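-- pv_equiv track=rewrite | github.com/Aaandria/GOA-Homework | day 29/homework/homework00.py | func
-- ===== SOURCE A (Python) =====
-- def func(words):
--     lst = []
--     lst_words = ""
--     for i in words:
--         if i != " ":
--             lst_words += i
--         else:
--             lst.append(lst_words)
--             lst_words = ""
--     new_sentance = ""
--     for i in lst :
--         new_sentance += i + ", "
--     return new_sentance
-- ===== SOURCE B (Python) =====
-- def func(words):
--     return "".join(w + ", " for w in words.split(" ")[:-1])
-- ===== Notes on version B (the rewrite author's own statement) =====
-- stated objective: simpler
-- what changed: Replaces A's character-by-character tokenizing loop and second accumulation loop with a one-liner: library split(" "), drop the trailing segment, and join each token with ', ' appended.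
import Mathlib
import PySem

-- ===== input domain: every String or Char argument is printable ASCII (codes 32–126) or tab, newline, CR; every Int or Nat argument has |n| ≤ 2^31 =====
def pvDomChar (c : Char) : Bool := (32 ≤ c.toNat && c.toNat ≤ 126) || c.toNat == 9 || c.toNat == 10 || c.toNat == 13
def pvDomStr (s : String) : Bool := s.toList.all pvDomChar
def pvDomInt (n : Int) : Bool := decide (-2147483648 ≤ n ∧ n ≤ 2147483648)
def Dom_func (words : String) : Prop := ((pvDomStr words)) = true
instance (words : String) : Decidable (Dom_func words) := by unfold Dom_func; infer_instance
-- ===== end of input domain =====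

-- B replaces A's hand-written char-by-char tokenizer + second append loop with split(" ")[:-1]
-- and a join of the tokens each followed by ", " (objective: simpler).

-- ===== PORT A =====
-- A scans the characters, accumulating the current word and pushing it on each space
-- (the word after the last space is never pushed), then concatenates every pushed word + ", ".
def func (words : String) : String :=
  let st := words.toList.foldl
    (fun (st : List (List Char) × List Char) i =>
      if i ≠ ' ' then (st.1, st.2 ++ [i]) else (st.1 ++ [st.2], []))
    ([], [])
  String.mk (st.1.foldl (fun acc w => acc ++ (w ++ [',', ' '])) [])

-- ===== PORT B =====
-- B: "".join(w + ", " for w in words.split(" ")[:-1])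
def func_alt (words : String) : String :=
  String.mk (PySem.Chars.join []
    (((PySem.Chars.splitOn words.toList [' ']).dropLast).map (fun w => w ++ [',', ' '])))

-- ===== PRECONDITION & SPEC =====
def Spec_func (words : String) (out : String) : Prop := out = func_alt words
instance (words : String) (out : String) : Decidable (Spec_func words out) := by unfold Spec_func; infer_instance

-- ===== CLAIM (what is proved, stated in full; the proofs are below) =====
def Claim_equal_func : Prop := ∀ (words : String), Dom_func words → Spec_func words (func words)

-- ===== LEMMAS AND PROOFS =====

-- Reference splitter on single-char ' ' separator, used only in the proofs.
def spl (cur : List Char) : List Char → List (List Char)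
  | [] => [cur]
  | c :: rest => if c = ' ' then cur :: spl [] rest else spl (cur ++ [c]) rest

theorem spl_ne_nil (cur : List Char) (cs : List Char) : spl cur cs ≠ [] := by
  induction cs generalizing cur with
  | nil => simp [spl]
  | cons c rest ih =>
    by_cases hc : c = ' ' <;> simp [spl, hc, ih]

theorem go_eq_spl : ∀ (fuel : Nat) (l cur : List Char) (acc : List (List Char)),
    l.length ≤ fuel →
    PySem.Chars.splitOn.go [' '] fuel l cur acc = acc.reverse ++ spl cur.reverse l := by
  intro fuel
  induction fuel with
  | zero =>
    intro l cur acc h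
    have hl : l = [] := List.eq_nil_of_length_eq_zero (Nat.le_zero.mp h)
    subst hl
    rw [PySem.Chars.splitOn.go.eq_def]
    simp [spl]
  | succ n ih =>
    intro l cur acc h
    cases l with
    | nil =>
      rw [PySem.Chars.splitOn.go.eq_def]
      simp [spl]
    | cons c rest =>
      rw [PySem.Chars.splitOn.go.eq_def]
      by_cases hc : c = ' '
      · subst hc
        simp only [List.isPrefixOf, Bool.and_true, beq_self_eq_true,
          if_pos, List.length_singleton, List.drop_one, List.tail_cons]
        rw [ih rest [] (cur.reverse :: acc)
          (by simpa using Nat.lt_succ_iff.mp (by simpa using h))]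
        simp [spl]
      · have hpre : ([' '].isPrefixOf (c :: rest)) = false := by
          simp [List.isPrefixOf]
          intro hcc; exact absurd hcc.symm hc
        simp only [hpre, Bool.false_eq_true, if_false]
        rw [ih rest (c :: cur) acc (by simpa using Nat.lt_succ_iff.mp (by simpa using h))]
        simp [spl, hc]

theorem splitOn_space_eq_spl (cs : List Char) :
    PySem.Chars.splitOn cs [' '] = spl [] cs := by
  show PySem.Chars.splitOn.go [' '] (cs.length + 1) cs [] [] = spl [] cs
  rw [go_eq_spl (cs.length + 1) cs [] [] (Nat.le_succ _)]
  simp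

theorem scan_fst : ∀ (cs : List Char) (lst : List (List Char)) (cur : List Char),
    (cs.foldl
      (fun (st : List (List Char) × List Char) i =>
        if i ≠ ' ' then (st.1, st.2 ++ [i]) else (st.1 ++ [st.2], [])) (lst, cur)).1
      = lst ++ (spl cur cs).dropLast := by
  intro cs
  induction cs with
  | nil => intro lst cur; simp [spl]
  | cons c rest ih =>
    intro lst cur
    by_cases hc : c = ' '
    · subst hc
      simp only [List.foldl_cons, ne_eq, not_true_eq_false, if_false]
      rw [ih (lst ++ [cur]) []]
      rw [spl, if_pos rfl, List.dropLast_cons_of_ne_nil (spl_ne_nil [] rest)]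
      simp
    · simp only [List.foldl_cons, ne_eq, hc, not_false_eq_true, if_pos]
      rw [ih lst (cur ++ [c])]
      simp [spl, hc]

theorem foldl_app_flatten :
    ∀ (l : List (List Char)) (acc : List Char),
      l.foldl (fun a w => a ++ (w ++ [',', ' '])) acc
        = acc ++ (l.map (fun w => w ++ [',', ' '])).flatten := by
  intro l
  induction l with
  | nil => intro acc; simp
  | cons w t ih => intro acc; simp [ih]

theorem join_nil_sep_eq_flatten : ∀ (l : List (List Char)),
    PySem.Chars.join [] l = l.flatten := by
  intro l
  induction l with
  | nil => rfl
  | cons a t ih =>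
    cases t with
    | nil => simp [PySem.Chars.join, List.intercalate]
    | cons b t' =>
      simp only [PySem.Chars.join, List.intercalate] at ih ⊢
      simp [List.intersperse, ih]

-- ===== VERDICT (by name: the statement is the Claim_ definition above) =====
theorem func_spec : Claim_equal_func := by
  intro words _
  show func words = func_alt words
  unfold func func_alt
  dsimp only
  rw [scan_fst, foldl_app_flatten, join_nil_sep_eq_flatten, splitOn_space_eq_spl]
  simp
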